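-- pv_equiv track=rewrite | github.com/yaranasserr/aws | OA leetcodediscuss/targetk.py | max_count_k
-- ===== SOURCE A (Python) =====
-- def max_count_k(arr, k):
--     diff = [k - i for i in arr]
--     n = len(diff)
--     i = 0
--
--     while i < n:
--         if diff[i] <= 0:
--             i += 1
--             continue
--
--         while i < n and diff[i] > 0:
--             diff[i] -= 1
--             i += 1
--
--
--     return sum(1 for d in diff if d == 0)
-- ===== SOURCE B (Python) =====
-- def max_count_k(arr, k):
--     count = 0
--     for x in arr:
--         if x == k or x == k - 1:
--             count += 1
--     return count
-- ===== Notes on version B (the rewrite author's own statement) =====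
-- stated objective: simpler
-- what changed: Replaced A's auxiliary difference list and its in-place decrement walk (which zeroes exactly the entries k-arr[i] in {0,1}) plus a final zero-count pass with a single direct counting loop over arr testing x == k or x == k-1.
import Mathlib
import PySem

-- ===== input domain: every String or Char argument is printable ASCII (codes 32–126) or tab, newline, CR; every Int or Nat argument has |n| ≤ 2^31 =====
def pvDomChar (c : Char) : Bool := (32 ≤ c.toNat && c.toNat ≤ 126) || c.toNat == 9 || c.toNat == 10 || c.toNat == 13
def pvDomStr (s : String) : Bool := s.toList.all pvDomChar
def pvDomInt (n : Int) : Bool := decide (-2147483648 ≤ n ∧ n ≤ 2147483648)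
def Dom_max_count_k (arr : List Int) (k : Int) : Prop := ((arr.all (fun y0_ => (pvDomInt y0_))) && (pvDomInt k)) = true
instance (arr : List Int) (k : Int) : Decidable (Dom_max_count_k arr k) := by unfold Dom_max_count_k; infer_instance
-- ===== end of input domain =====

-- B replaces A's auxiliary diff list, its in-place decrement walk and the final
-- zero-count pass with one direct counting loop over arr (objective: simpler).

-- ===== PORT A =====
-- inner `while i < n and diff[i] > 0: diff[i] -= 1; i += 1`; fuel only bounds the
-- iteration count to make the loop total (fuel = n - i suffices, proved below);
-- i is always in range, so getD is exact for diff[i]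
def pvInnerA (fuel : Nat) (diff : List Int) (i n : Nat) : List Int × Nat :=
  match fuel with
  | 0 => (diff, i)
  | fuel + 1 =>
    if i < n ∧ 0 < diff.getD i 0 then
      pvInnerA fuel (diff.set i (diff.getD i 0 - 1)) (i + 1) n
    else (diff, i)

-- outer `while i < n:` loop of A, same fuel discipline
def pvOuterA (fuel : Nat) (diff : List Int) (i n : Nat) : List Int :=
  match fuel with
  | 0 => diff
  | fuel + 1 =>
    if i < n then
      if diff.getD i 0 ≤ 0 then pvOuterA fuel diff (i + 1) n
      else pvOuterA fuel (pvInnerA (n - i) diff i n).1 (pvInnerA (n - i) diff i n).2 n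
    else diff

def max_count_k (arr : List Int) (k : Int) : Int :=
  let diff := arr.map (fun x => k - x)
  let n := diff.length
  let final := pvOuterA n diff 0 n
  ((final.countP (fun d => d == 0) : Nat) : Int)

-- ===== PORT B =====
def max_count_k_alt (arr : List Int) (k : Int) : Int :=
  arr.foldl (fun count x => if x == k || x == k - 1 then count + 1 else count) 0

-- ===== PRECONDITION & SPEC =====
def Spec_max_count_k (arr : List Int) (k : Int) (out : Int) : Prop := out = max_count_k_alt arr k
instance (arr : List Int) (k : Int) (out : Int) : Decidable (Spec_max_count_k arr k out) := by unfold Spec_max_count_k; infer_instance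

-- ===== CLAIM (what is proved, stated in full; the proofs are below) =====
def Claim_equal_max_count_k : Prop := ∀ (arr : List Int) (k : Int), Dom_max_count_k arr k → Spec_max_count_k arr k (max_count_k arr k)

-- ===== LEMMAS AND PROOFS =====

def pvDec1 (d : Int) : Int := if 0 < d then d - 1 else d

theorem pvGetD_append (pre : List Int) (d : Int) (rest : List Int) :
    (pre ++ d :: rest).getD pre.length 0 = d := by
  simp [List.getD_eq_getElem?_getD]

theorem pvSet_append (pre : List Int) (d v : Int) (rest : List Int) :
    (pre ++ d :: rest).set pre.length v = pre ++ v :: rest := by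
  rw [List.set_append_right _ _ (Nat.le_refl _)]
  simp

-- pvInnerA started at a split point decrements the positive prefix and stops
theorem pvInnerA_spec (rest : List Int) : ∀ (fuel : Nat) (pre : List Int) (n : Nat),
    rest.length ≤ fuel → n = pre.length + rest.length →
    pvInnerA fuel (pre ++ rest) pre.length n =
      (pre ++ (rest.takeWhile (fun d => decide (0 < d))).map (· - 1) ++
         rest.dropWhile (fun d => decide (0 < d)),
       pre.length + (rest.takeWhile (fun d => decide (0 < d))).length) := by
  induction rest with
  | nil =>
    intro fuel pre n _ hn
    match fuel with
    | 0 => simp [pvInnerA]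
    | fuel + 1 =>
      rw [pvInnerA, if_neg (by simp at hn; omega)]
      simp
  | cons d rest ih =>
    intro fuel pre n hf hn
    have hf' : rest.length + 1 ≤ fuel := by simpa using hf
    have hn' : n = pre.length + rest.length + 1 := by simp at hn; omega
    match fuel, hf' with
    | fuel + 1, _ =>
    have hf'' : rest.length ≤ fuel := by omega
    by_cases hd : 0 < d
    · rw [pvInnerA]
      rw [if_pos ⟨by omega, by rw [pvGetD_append]; exact hd⟩]
      rw [pvGetD_append, pvSet_append]
      have := ih fuel (pre ++ [d - 1]) n (by omega) (by simp; omega)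
      simp only [List.append_assoc, List.cons_append, List.nil_append,
        List.length_append, List.length_cons, List.length_nil] at this
      rw [this]
      simp [hd]
      omega
    · rw [pvInnerA]
      rw [if_neg (by rw [pvGetD_append]; omega)]
      simp [hd]

-- pvOuterA from a split point applies pvDec1 to every remaining element
theorem pvOuterA_spec (m : Nat) : ∀ (rest : List Int), rest.length ≤ m →
    ∀ (fuel : Nat) (pre : List Int) (n : Nat), rest.length ≤ fuel →
    n = pre.length + rest.length →
    pvOuterA fuel (pre ++ rest) pre.length n = pre ++ rest.map pvDec1 := by
  induction m with
  | zero =>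
    intro rest hr fuel pre n hf hn
    have h0 : rest = [] := List.eq_nil_of_length_eq_zero (by omega)
    subst h0
    simp at hn
    match fuel with
    | 0 => simp [pvOuterA]
    | fuel + 1 =>
      rw [pvOuterA, if_neg (by omega)]
      simp
  | succ m ih =>
    intro rest hr fuel pre n hf hn
    match rest with
    | [] =>
      simp at hn
      match fuel with
      | 0 => simp [pvOuterA]
      | fuel + 1 =>
        rw [pvOuterA, if_neg (by omega)]
        simp
    | d :: rest =>
      have hr' : rest.length + 1 ≤ m + 1 := by simpa using hr
      have hf0 : rest.length + 1 ≤ fuel := by simpa using hf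
      have hn' : n = pre.length + rest.length + 1 := by simp at hn; omega
      match fuel, hf0 with
      | fuel + 1, _ =>
      have hf'' : rest.length ≤ fuel := by omega
      rw [pvOuterA]
      rw [if_pos (by omega)]
      by_cases hd : 0 < d
      · rw [if_neg (by rw [pvGetD_append]; omega)]
        have hfuelI : (d :: rest).length ≤ n - pre.length := by simp; omega
        rw [pvInnerA_spec (d :: rest) (n - pre.length) pre n hfuelI hn]
        simp only [List.takeWhile_cons, List.dropWhile_cons, hd, decide_true, if_true,
          List.map_cons, List.length_cons]
        set t := rest.takeWhile (fun d => decide (0 < d)) with ht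
        set w := rest.dropWhile (fun d => decide (0 < d)) with hw
        have hsplit : t ++ w = rest := List.takeWhile_append_dropWhile
        have hlen : t.length + w.length = rest.length := by
          rw [← List.length_append, hsplit]
        have hpre2 : pre.length + (t.length + 1) = (pre ++ (d - 1) :: t.map (· - 1)).length := by
          simp
        rw [show pre ++ ((d - 1) :: t.map (· - 1)) ++ w
              = (pre ++ (d - 1) :: t.map (· - 1)) ++ w by simp,
            hpre2,
            ih w (by omega) fuel (pre ++ (d - 1) :: t.map (· - 1)) n (by omega) (by simp; omega)]
        have hmap : rest.map pvDec1 = t.map (· - 1) ++ w.map pvDec1 := by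
          rw [← hsplit, List.map_append]
          congr 1
          apply List.map_congr_left
          intro x hx
          have := List.mem_takeWhile_imp hx
          simp at this
          simp [pvDec1, this]
        simp [hmap, pvDec1, hd]
      · rw [if_pos (by rw [pvGetD_append]; omega)]
        have hL : pre.length + 1 = (pre ++ [d]).length := by simp
        rw [hL, show pre ++ d :: rest = (pre ++ [d]) ++ rest by simp,
            ih rest (by omega) fuel (pre ++ [d]) n (by omega) (by simp; omega)]
        simp [pvDec1, hd]

theorem pvFoldl_count (k : Int) (arr : List Int) : ∀ (c : Int),
    arr.foldl (fun count x => if x == k || x == k - 1 then count + 1 else count) c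
      = c + (arr.countP (fun x => x == k || x == k - 1) : Nat) := by
  induction arr with
  | nil => intro c; simp
  | cons d arr ih =>
    intro c
    rw [List.foldl_cons, List.countP_cons, ih]
    by_cases h : (d == k || d == k - 1) = true
    · simp [h]; ring
    · simp [h]

-- ===== VERDICT (by name: the statement is the Claim_ definition above) =====
theorem max_count_k_spec : Claim_equal_max_count_k := by
  intro arr k _
  unfold Spec_max_count_k max_count_k max_count_k_alt
  simp only []
  have h := pvOuterA_spec (arr.map (fun x => k - x)).length (arr.map (fun x => k - x))
    (Nat.le_refl _) (arr.map (fun x => k - x)).length [] (arr.map (fun x => k - x)).length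
    (Nat.le_refl _) (by simp)
  simp only [List.nil_append, List.length_nil] at h
  rw [h]
  rw [pvFoldl_count]
  simp only [List.map_map, List.countP_map, zero_add]
  congr 1
  apply List.countP_congr
  intro x _
  simp only [Function.comp, pvDec1, beq_iff_eq, Bool.or_eq_true]
  by_cases h : 0 < k - x
  · simp only [if_pos h]; omega
  · simp only [if_neg h]; omega
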